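-- pv_equiv track=rewrite | github.com/Akeneus/sequence-assembler | doubleHelix.py | _rebuild_sequences_considering_double_helix
-- ===== SOURCE A (Python) =====
-- def _check_sequence(sequence_to_check:str, sequence_getting_checked:str) -> int:
--     """
--     _check_sequence verifys if a subsequence of sequence_to_check is a Prefix of sequence_getting_checked.
--     If that is the case, the lenth of that subsequence is the weight of the edge between these two sequences
--     and this length is returned
--
--     :param sequence_to_check: the sequence which shall be checked to be a prefix
--     :param sequence_getting_checked: the sequence which has a potential prefix
--     :return: the size of the matching prefixstring
--     """
--     sequence_to_check_length = len(sequence_to_check)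
--     v = 0
--     for start_index in range(sequence_to_check_length):
--         tmp_sub_sequence = sequence_to_check[start_index:sequence_to_check_length]
--         if(sequence_getting_checked.startswith(tmp_sub_sequence)):
--             return len(tmp_sub_sequence)
--     return v
--
-- def _rebuild_sequences_considering_double_helix(l_sequences:list):
--
--     """
--     _rebuild_sequences_considering_double_helix considers the data to be from a double helix and determins from which strand the sequences are.
--     Considering this, the datalist is rebuild with potential complement sequences
--
--     :param l_sequences: original data List
--     :return: new Data list
--     """
--     l_new_sequences = []
--     l_new_sequences.append(l_sequences[0])
--     l_copy_sequences = l_sequences.copy()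
--     for sequence in l_copy_sequences[1::]:
--         same = 0
--         opp = 0
--         for saved_sequence in l_new_sequences:
--             same += _check_both_Sequences(saved_sequence, sequence)
--             opp += _check_both_Sequences(_get_complement_sequence(sequence), saved_sequence)
--
--         if(same > opp):
--             l_new_sequences.append(sequence)
--         else:
--             l_new_sequences.append(_get_complement_sequence(sequence))
--     return l_new_sequences
--
-- def _check_both_Sequences(sequence_one:str, sequnece_two:str) -> int:
--
--     """
--     _check_Sequence_left_and_right checks the weight of the two sequences to each other and adds them
--
--     :param sequence_one:
--     :param sequnece_two:
--     :return: the added weights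
--     """
--     weight_one = _check_sequence(sequence_one,sequnece_two)
--     weight_two = _check_sequence(sequnece_two,sequence_one)
--     return weight_one+weight_two
--
-- def _get_complement_sequence(sequence:str) -> str:
--
--     """
--     _get_complement_sequence builds the complement sequence to a given sequence
--     the complement is defined as a reversed version where every base is changed to its complement base
--
--     :param sequence: the sequence to build the complement of
--     :return: the complement version of a sequence
--     """
--     res_sequence = sequence
--     res_sequence = res_sequence.replace("A","t")
--     res_sequence = res_sequence.replace("T","a")
--     res_sequence = res_sequence.replace("G","c")
--     res_sequence = res_sequence.replace("C","g")
--     return (res_sequence.upper())[::-1]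
-- ===== SOURCE B (Python) =====
-- _COMP = {'A': 'T', 'C': 'G', 'G': 'C', 'T': 'A'}
--
--
-- def _revcomp(s):
--     return ''.join(_COMP.get(c, c.upper()) for c in reversed(s))
--
--
-- def _overlap(s, t):
--     # Longest k with s[-k:] == t[:k], via the KMP prefix function of
--     # t + sep + s (sep = None, an object equal to no character, so no
--     # separator collision is possible): the last prefix-function value
--     # is the longest proper border of the combined word, which is exactly
--     # the longest suffix of s that is a prefix of t.
--     p = list(t) + [None] + list(s)
--     pi = [0] * len(p)
--     j = 0
--     for i in range(1, len(p)):
--         c = p[i]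
--         while j > 0 and p[j] != c:
--             j = pi[j - 1]
--         if p[j] == c:
--             j += 1
--         pi[i] = j
--     return pi[-1]
--
--
-- def _rebuild_sequences_considering_double_helix(l_sequences: list):
--     chosen = [l_sequences[0]]
--     for seq in l_sequences[1:]:
--         comp = _revcomp(seq)
--         score = 0
--         for w in chosen:
--             score = score + (_overlap(w, seq) + _overlap(seq, w)) - (_overlap(comp, w) + _overlap(w, comp))
--         chosen.append(seq if score > 0 else comp)
--     return chosen
-- ===== Notes on version B (the rewrite author's own statement) =====
-- stated objective: alternative
-- what changed: Each suffix-prefix overlap is computed as the last KMP prefix-function value of t+separator+s instead of A's scan over every suffix start with startswith, the two same/opp sums collapse into one signed score accumulator, and the reverse complement is a per-character table map over the reversed string instead of A's replace chain.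
import Mathlib
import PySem

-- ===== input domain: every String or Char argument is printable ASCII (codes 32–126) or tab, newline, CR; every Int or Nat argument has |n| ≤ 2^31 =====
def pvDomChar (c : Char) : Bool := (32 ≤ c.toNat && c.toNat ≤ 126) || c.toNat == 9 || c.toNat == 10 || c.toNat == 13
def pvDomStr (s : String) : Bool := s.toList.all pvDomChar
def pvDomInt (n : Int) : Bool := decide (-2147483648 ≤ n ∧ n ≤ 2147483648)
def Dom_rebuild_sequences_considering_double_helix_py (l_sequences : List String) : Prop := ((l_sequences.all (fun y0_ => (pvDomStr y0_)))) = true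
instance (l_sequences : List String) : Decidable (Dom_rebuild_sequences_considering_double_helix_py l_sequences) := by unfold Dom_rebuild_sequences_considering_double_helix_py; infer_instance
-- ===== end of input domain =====

-- B computes each suffix-prefix overlap as the last KMP prefix-function value of t+sep+s instead
-- of A's scan over every suffix start, collapses the two same/opp sums into one signed score
-- accumulator, and maps the reverse complement through a character table (alternative algorithm);
-- return values only, no argument is mutated.


-- ===== PORT A =====

-- _get_complement_sequence: four str.replace calls, .upper(), then [::-1]
def pvComplementA (s : String) : String :=
  let r1 := PySem.Str.replace s "A" "t"
  let r2 := PySem.Str.replace r1 "T" "a"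
  let r3 := PySem.Str.replace r2 "G" "c"
  let r4 := PySem.Str.replace r3 "C" "g"
  (PySem.Str.slice? (PySem.Str.upper r4) none none (-1)).getD ""  -- step -1 ≠ 0: never none

-- the 'for start_index in range(...)' loop of _check_sequence with its early return
def pvCheckLoopA (s t : String) (idxs : List Int) : Int :=
  match idxs with
  | [] => 0                                  -- 'return v' with v = 0
  | i :: rest =>
      let sub := PySem.Str.slice s (some i) (some (PySem.Str.len s))
      if PySem.Str.startswith t sub then PySem.Str.len sub
      else pvCheckLoopA s t rest

def pvCheckSequenceA (s t : String) : Int :=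
  pvCheckLoopA s t (PySem.List.pyRange 0 (PySem.Str.len s) 1)

def pvCheckBothA (s1 s2 : String) : Int :=
  pvCheckSequenceA s1 s2 + pvCheckSequenceA s2 s1

def rebuild_sequences_considering_double_helix_py (l_sequences : List String) : List String :=
  -- l_new_sequences = [l_sequences[0]]  (IndexError on []: excluded by Pre_)
  let l_new := [PySem.List.pyGetD l_sequences 0 ""]
  let l_copy := l_sequences
  (PySem.List.slice l_copy (some 1) none).foldl
    (fun acc sequence =>
      let p := acc.foldl
        (fun (so : Int × Int) saved =>
          (so.1 + pvCheckBothA saved sequence,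
           so.2 + pvCheckBothA (pvComplementA sequence) saved))
        (0, 0)
      if p.1 > p.2 then acc ++ [sequence] else acc ++ [pvComplementA sequence])
    l_new

-- ===== PORT B =====

def pvCompTable : PySem.Dict Char Char :=
  PySem.Dict.ofList [('A', 'T'), ('C', 'G'), ('G', 'C'), ('T', 'A')]

-- _revcomp: per-character table lookup (default c.upper(), exact on one ASCII char) over reversed(s)
def pvRevCompB (s : String) : String :=
  String.ofList (s.toList.reverse.map (fun c => pvCompTable.getD c (PySem.Chars.upperChar c)))

-- the inner 'while j > 0 and p[j] != c: j = pi[j-1]' of _overlap; fuel = entry value of j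
-- suffices because every iteration strictly decreases j (pi[j-1] is a proper border length < j)
def pvFall (p : List (Option Char)) (pi : List Nat) (c : Option Char) : Nat → Nat → Nat
  | 0, j => j
  | fuel+1, j =>
      if j > 0 ∧ p.getD j none ≠ c then pvFall p pi c fuel (pi.getD (j-1) 0) else j

-- one iteration of _overlap's 'for i in range(1, len(p))' (pi is built left to right, as in Python)
def pvKmpStep (p : List (Option Char)) (st : List Nat × Nat) (i : Nat) : List Nat × Nat :=
  let c := p.getD i none
  let j1 := pvFall p st.1 c st.2 st.2
  let j2 := if p.getD j1 none = c then j1 + 1 else j1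
  (st.1 ++ [j2], j2)

-- _overlap: last prefix-function value of list(t) + [None] + list(s) (None = the separator)
def pvOverlapB (s t : String) : Int :=
  let p : List (Option Char) := t.toList.map some ++ [none] ++ s.toList.map some
  let res := (List.range' 1 (p.length - 1)).foldl (pvKmpStep p) ([0], 0)
  ((res.1.getLastD 0 : Nat) : Int)

def rebuild_sequences_considering_double_helix_py_alt (l_sequences : List String) : List String :=
  l_sequences.tail.foldl
    (fun chosen seq =>
      let comp := pvRevCompB seq
      let score := chosen.foldl
        (fun sc w =>
          sc + (pvOverlapB w seq + pvOverlapB seq w) - (pvOverlapB comp w + pvOverlapB w comp))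
        0
      chosen ++ [if score > 0 then seq else comp])
    [PySem.List.pyGetD l_sequences 0 ""]

-- ===== PRECONDITION & SPEC =====
-- Pre_ excludes only the empty list, where A raises IndexError on l_sequences[0] (B raises there too).
def Pre_rebuild_sequences_considering_double_helix_py (l_sequences : List String) : Prop :=
  l_sequences ≠ []
instance (l_sequences : List String) : Decidable (Pre_rebuild_sequences_considering_double_helix_py l_sequences) := by unfold Pre_rebuild_sequences_considering_double_helix_py; infer_instance

def pvWitness_rebuild_sequences_considering_double_helix_py : List String := ["ACGT", "ACgt", "TT"]

def Spec_rebuild_sequences_considering_double_helix_py (l_sequences : List String) (out : List String) : Prop := out = rebuild_sequences_considering_double_helix_py_alt l_sequences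
instance (l_sequences : List String) (out : List String) : Decidable (Spec_rebuild_sequences_considering_double_helix_py l_sequences out) := by unfold Spec_rebuild_sequences_considering_double_helix_py; infer_instance

-- ===== CLAIM (what is proved, stated in full; the proofs are below) =====
def Claim_equal_rebuild_sequences_considering_double_helix_py : Prop := ∀ (l_sequences : List String), Dom_rebuild_sequences_considering_double_helix_py l_sequences → Pre_rebuild_sequences_considering_double_helix_py l_sequences → Spec_rebuild_sequences_considering_double_helix_py l_sequences (rebuild_sequences_considering_double_helix_py l_sequences)

-- ===== LEMMAS AND PROOFS =====

theorem pv_go_single (a b : Char) :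
    ∀ (fuel : Nat) (l acc : List Char), l.length ≤ fuel →
    PySem.Chars.replace.go [a] [b] fuel l acc
      = acc.reverse ++ l.map (fun c => if c = a then b else c) := by
  intro fuel
  induction fuel with
  | zero =>
    intro l acc h
    cases l with
    | nil => simp [PySem.Chars.replace.go]
    | cons c t => simp at h
  | succ n ih =>
    intro l acc h
    cases l with
    | nil => simp [PySem.Chars.replace.go]
    | cons c t =>
      rw [PySem.Chars.replace.go]
      by_cases hc : a = c
      · subst hc
        simp only [List.isPrefixOf, beq_self_eq_true, Bool.true_and, if_true, List.length_cons,
          List.length_nil, List.drop_succ_cons, List.drop_zero]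
        rw [ih t ([b].reverse ++ acc) (by simpa using Nat.le_of_succ_le_succ h)]
        simp
      · simp only [List.isPrefixOf, Bool.and_true, beq_iff_eq, hc,
          if_false]
        rw [ih t (c :: acc) (by simpa using Nat.le_of_succ_le_succ h)]
        simp [Ne.symm hc]

theorem pv_replace_single (cs : List Char) (a b : Char) :
    PySem.Chars.replace cs [a] [b] = cs.map (fun c => if c = a then b else c) := by
  rw [PySem.Chars.replace]
  simp [pv_go_single a b cs.length cs [] le_rfl]

theorem pv_table_lit : pvCompTable = PySem.Dict.mk [('A', 'T'), ('C', 'G'), ('G', 'C'), ('T', 'A')] := by decide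

theorem pv_char_eq (c : Char) :
    PySem.Chars.upperChar
      (if (if (if (if c = 'A' then 't' else c) = 'T' then 'a' else (if c = 'A' then 't' else c)) = 'G'
            then 'c' else (if (if c = 'A' then 't' else c) = 'T' then 'a' else (if c = 'A' then 't' else c))) = 'C'
          then 'g'
          else (if (if (if c = 'A' then 't' else c) = 'T' then 'a' else (if c = 'A' then 't' else c)) = 'G'
            then 'c' else (if (if c = 'A' then 't' else c) = 'T' then 'a' else (if c = 'A' then 't' else c))))
      = pvCompTable.getD c (PySem.Chars.upperChar c) := by
  by_cases hA : c = 'A'; · subst hA; decide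
  by_cases hT : c = 'T'; · subst hT; decide
  by_cases hG : c = 'G'; · subst hG; decide
  by_cases hC : c = 'C'; · subst hC; decide
  have hc : pvCompTable.contains c = false := by
    rw [pv_table_lit]
    simp only [PySem.Dict.contains_mk]
    simp [Ne.symm hA, Ne.symm hT, Ne.symm hG, Ne.symm hC]
  rw [PySem.Dict.getD_of_not_contains pvCompTable (PySem.Chars.upperChar c) hc]
  simp [hA, hT, hG, hC]

theorem pv_compl_eq (s : String) : pvComplementA s = pvRevCompB s := by
  show (PySem.Str.slice? (PySem.Str.upper (PySem.Str.replace (PySem.Str.replace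
      (PySem.Str.replace (PySem.Str.replace s "A" "t") "T" "a") "G" "c") "C" "g"))
      none none (-1)).getD "" = _
  rw [PySem.Str.slice?_none_none_neg_one]
  simp only [Option.getD_some]
  refine congrArg String.ofList ?_
  simp only [PySem.Str.toList_upper, PySem.Str.toList_replace]
  rw [show ("A" : String).toList = ['A'] from rfl, show ("t" : String).toList = ['t'] from rfl,
      show ("T" : String).toList = ['T'] from rfl, show ("a" : String).toList = ['a'] from rfl,
      show ("G" : String).toList = ['G'] from rfl, show ("c" : String).toList = ['c'] from rfl,
      show ("C" : String).toList = ['C'] from rfl, show ("g" : String).toList = ['g'] from rfl]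
  simp only [pv_replace_single, PySem.Chars.upper, ← List.map_reverse, List.map_map]
  apply List.map_congr_left
  intro c _
  exact pv_char_eq c

-- A's overlap loop, characterised

def pvOv : List Char → List Char → Int
  | [], _ => 0
  | c :: rest, t => if List.isPrefixOf (c :: rest) t then ((c :: rest).length : Int) else pvOv rest t

def pvBestN (cond : Nat → Bool) : Nat → Nat
  | 0 => 0
  | k+1 => if cond (k+1) then k+1 else pvBestN cond k

def pvBest (cond : Nat → Bool) (n : Nat) : Int := ((pvBestN cond n : Nat) : Int)

theorem pvBestN_congr (f g : Nat → Bool) :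
    ∀ N, (∀ j, 1 ≤ j → j ≤ N → f j = g j) → pvBestN f N = pvBestN g N := by
  intro N
  induction N with
  | zero => intro _; rfl
  | succ n ih =>
    intro h
    simp only [pvBestN, h (n+1) (by omega) (by omega),
      ih (fun j h1 h2 => h j h1 (by omega))]

theorem pvBestN_le (f : Nat → Bool) : ∀ N, pvBestN f N ≤ N := by
  intro N
  induction N with
  | zero => simp [pvBestN]
  | succ n ih => simp only [pvBestN]; split <;> omega

theorem pvBestN_mem (f : Nat → Bool) : ∀ N, pvBestN f N = 0 ∨ f (pvBestN f N) = true := by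
  intro N
  induction N with
  | zero => left; rfl
  | succ n ih =>
    simp only [pvBestN]
    split
    · right; assumption
    · exact ih

theorem pvBestN_ge (f : Nat → Bool) : ∀ N k, k ≤ N → f k = true → k ≤ pvBestN f N := by
  intro N
  induction N with
  | zero => intro k h _; omega
  | succ n ih =>
    intro k h hf
    simp only [pvBestN]
    split
    · omega
    · rcases Nat.lt_or_ge k (n+1) with h' | h'
      · exact ih k (by omega) hf
      · have : k = n + 1 := by omega
        subst this; simp_all

theorem pvBestN_eq (f g : Nat → Bool) (N M : Nat)
    (h : ∀ k, (k ≤ N ∧ f k = true) ↔ (k ≤ M ∧ g k = true)) :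
    pvBestN f N = pvBestN g M := by
  apply Nat.le_antisymm
  · rcases pvBestN_mem f N with h0 | hmem
    · omega
    · have := (h (pvBestN f N)).mp ⟨pvBestN_le f N, hmem⟩
      exact pvBestN_ge g M _ this.1 this.2
  · rcases pvBestN_mem g M with h0 | hmem
    · omega
    · have := (h (pvBestN g M)).mpr ⟨pvBestN_le g M, hmem⟩
      exact pvBestN_ge f N _ this.1 this.2

theorem pvA_loop (s t : String) :
    ∀ (m j : Nat), s.toList.length ≤ j + m →
    pvCheckLoopA s t (PySem.List.pyRange (j : Int) (PySem.Str.len s) 1)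
      = pvOv (s.toList.drop j) t.toList := by
  intro m
  induction m with
  | zero =>
    intro j h
    rw [PySem.List.pyRange_one_eq_nil (by simp only [PySem.Str.len]; omega)]
    rw [List.drop_eq_nil_of_le (by omega)]
    rfl
  | succ m ih =>
    intro j h
    by_cases hj : j < s.toList.length
    · rw [PySem.List.pyRange_one_cons (by simp only [PySem.Str.len]; omega)]
      show (if PySem.Str.startswith t (PySem.Str.slice s (some (j:Int)) (some (PySem.Str.len s)))
            then PySem.Str.len (PySem.Str.slice s (some (j:Int)) (some (PySem.Str.len s)))
            else pvCheckLoopA s t (PySem.List.pyRange ((j:Int)+1) (PySem.Str.len s) 1)) = _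
      have hsub : (PySem.Str.slice s (some (j:Int)) (some (PySem.Str.len s))).toList
          = s.toList.drop j := by
        show (String.ofList (PySem.Chars.slice s.toList (some (j:Int)) (some (PySem.Str.len s)))).toList = _
        rw [String.toList_ofList]
        show PySem.Chars.slice _ _ (some ((s.toList.length : Nat) : Int)) = _
        rw [PySem.Chars.slice_eq_listSlice, PySem.List.slice_natCast]
        rw [List.take_of_length_le (by simp)]
      rw [List.drop_eq_getElem_cons hj]
      show (if PySem.Str.startswith t _ then _ else _) = pvOv (s.toList[j] :: s.toList.drop (j+1)) t.toList
      rw [pvOv]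
      have hcond : PySem.Str.startswith t (PySem.Str.slice s (some (j:Int)) (some (PySem.Str.len s)))
          = List.isPrefixOf (s.toList[j] :: s.toList.drop (j+1)) t.toList := by
        show List.isPrefixOf (PySem.Str.slice s (some (j:Int)) (some (PySem.Str.len s))).toList t.toList = _
        rw [hsub, List.drop_eq_getElem_cons hj]
      have hlen : PySem.Str.len (PySem.Str.slice s (some (j:Int)) (some (PySem.Str.len s)))
          = ((s.toList[j] :: s.toList.drop (j+1)).length : Int) := by
        show ((PySem.Str.slice s (some (j:Int)) (some (PySem.Str.len s))).toList.length : Int) = _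
        rw [hsub, List.drop_eq_getElem_cons hj]
      have hstep : ((j : Int) + 1) = ((j + 1 : Nat) : Int) := by push_cast; ring
      rw [hcond, hlen, hstep, ih (j+1) (by omega)]
    · rw [PySem.List.pyRange_one_eq_nil (by simp only [PySem.Str.len]; omega)]
      rw [List.drop_eq_nil_of_le (by omega)]
      rfl

theorem pvOv_eq_pvBest (t : List Char) :
    ∀ s : List Char,
    pvOv s t = pvBest (fun j => decide (t.take j = s.drop (s.length - j))) (min s.length t.length) := by
  intro s
  induction s with
  | nil => simp [pvOv, pvBest, pvBestN]
  | cons c rest ih =>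
    have hcongr : ∀ N, N ≤ rest.length →
        pvBestN (fun j => decide (t.take j = (c :: rest).drop ((c :: rest).length - j))) N
          = pvBestN (fun j => decide (t.take j = rest.drop (rest.length - j))) N := by
      intro N hN
      apply pvBestN_congr
      intro j h1 h2
      have : (c :: rest).length - j = (rest.length - j) + 1 := by simp; omega
      rw [this, List.drop_succ_cons]
    by_cases hm : (c :: rest).length ≤ t.length
    · have hmin : min (c :: rest).length t.length = rest.length + 1 := by
        simp only [List.length_cons] at hm ⊢
        omega
      rw [hmin, pvOv]
      show _ = ((pvBestN _ (rest.length + 1) : Nat) : Int)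
      rw [pvBestN]
      have htop : decide (t.take (rest.length + 1) = (c :: rest).drop ((c :: rest).length - (rest.length + 1)))
          = List.isPrefixOf (c :: rest) t := by
        simp only [List.length_cons, Nat.sub_self, List.drop_zero]
        by_cases hp : (c :: rest) <+: t
        · have h1 : (c :: rest).isPrefixOf t = true := List.isPrefixOf_iff_prefix.mpr hp
          rw [h1, decide_eq_true_eq]
          have h2 := List.prefix_iff_eq_take.mp hp
          simpa using h2.symm
        · have h1 : (c :: rest).isPrefixOf t = false := by
            rw [Bool.eq_false_iff, ne_eq, List.isPrefixOf_iff_prefix]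
            exact hp
          simp only [h1, decide_eq_false_iff_not]
          intro hEq
          apply hp
          rw [List.prefix_iff_eq_take]
          simpa using hEq.symm
      rw [htop]
      by_cases hp : List.isPrefixOf (c :: rest) t
      · simp [hp]
      · simp only [hp, Bool.false_eq_true, if_false]
        rw [hcongr rest.length le_rfl]
        rw [ih]
        have h3 : min rest.length t.length = rest.length := by
          simp only [List.length_cons] at hm
          omega
        rw [h3]
        rfl
    · have hmin : min (c :: rest).length t.length = t.length := by
        simp only [List.length_cons] at hm ⊢
        omega
      have hp : List.isPrefixOf (c :: rest) t = false := by
        rw [Bool.eq_false_iff, ne_eq, List.isPrefixOf_iff_prefix]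
        intro hpre
        exact hm hpre.length_le
      rw [pvOv, hp]
      simp only [Bool.false_eq_true, if_false]
      rw [hmin]
      show _ = ((pvBestN _ t.length : Nat) : Int)
      rw [hcongr t.length (by simp only [List.length_cons] at hm; omega)]
      rw [ih]
      have h3 : min rest.length t.length = t.length := by
        simp only [List.length_cons] at hm
        omega
      rw [h3]
      rfl

-- borders and the prefix function

def pvBorder (q : List (Option Char)) (k : Nat) : Prop :=
  k < q.length ∧ q.take k = q.drop (q.length - k)

def pvMaxB (q : List (Option Char)) : Nat :=
  pvBestN (fun k => decide (q.take k = q.drop (q.length - k))) (q.length - 1)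

theorem pvMaxB_lt (q : List (Option Char)) (h : q ≠ []) : pvMaxB q < q.length := by
  have := pvBestN_le (fun k => decide (q.take k = q.drop (q.length - k))) (q.length - 1)
  have : pvMaxB q ≤ q.length - 1 := this
  have hl : 1 ≤ q.length := by
    cases q with
    | nil => simp at h
    | cons a l => simp
  omega

theorem pvMaxB_border (q : List (Option Char)) (h : q ≠ []) : pvBorder q (pvMaxB q) := by
  rcases pvBestN_mem (fun k => decide (q.take k = q.drop (q.length - k))) (q.length - 1) with h0 | hmem
  · refine ⟨by rw [show pvMaxB q = 0 from h0]; exact List.length_pos_of_ne_nil h, ?_⟩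
    rw [show pvMaxB q = 0 from h0]
    simp
  · exact ⟨pvMaxB_lt q h, by simpa using hmem⟩

theorem pvMaxB_ge (q : List (Option Char)) (k : Nat) (h : pvBorder q k) : k ≤ pvMaxB q := by
  exact pvBestN_ge _ (q.length - 1) k (by have := h.1; omega) (by simpa using h.2)

-- border of a border is a border
theorem pvBorder_trans (q : List (Option Char)) (m k : Nat)
    (hm : pvBorder q m) (hk : pvBorder (q.take m) k) : pvBorder q k := by
  obtain ⟨hm1, hm2⟩ := hm
  obtain ⟨hk1, hk2⟩ := hk
  have hmlen : (q.take m).length = m := by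
    rw [List.length_take]; omega
  rw [hmlen] at hk1 hk2
  refine ⟨by omega, ?_⟩
  have e1 : (q.take m).take k = q.take k := by
    rw [List.take_take]; congr 1; omega
  have e2 : (q.take m).drop (m - k) = q.drop (q.length - k) := by
    rw [hm2, List.drop_drop]
    congr 1
    omega
  rw [e1, e2] at hk2
  exact hk2

-- a smaller border is a border of a bigger border
theorem pvBorder_mono (q : List (Option Char)) (k m : Nat)
    (hk : pvBorder q k) (hm : pvBorder q m) (hlt : k < m) : pvBorder (q.take m) k := by
  obtain ⟨hk1, hk2⟩ := hk
  obtain ⟨hm1, hm2⟩ := hm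
  have hmlen : (q.take m).length = m := by
    rw [List.length_take]; omega
  refine ⟨by omega, ?_⟩
  rw [hmlen]
  have e1 : (q.take m).take k = q.take k := by
    rw [List.take_take]; congr 1; omega
  have e2 : (q.take m).drop (m - k) = q.drop (q.length - k) := by
    rw [hm2, List.drop_drop]
    congr 1
    omega
  rw [e1, e2]
  exact hk2

-- extending a border by one character
theorem pvBorder_ext (q : List (Option Char)) (c : Option Char) (k : Nat) :
    pvBorder (q ++ [c]) (k+1) ↔ (pvBorder q k ∧ q.getD k none = c) := by
  constructor
  · rintro ⟨h1, h2⟩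
    have hk : k < q.length := by simpa using h1
    have e1 : (q ++ [c]).take (k+1) = q.take k ++ [q[k]] := by
      rw [List.take_append_of_le_length (by omega), List.take_add_one]
      simp [List.getElem?_eq_getElem hk]
    have e2 : (q ++ [c]).drop ((q ++ [c]).length - (k+1)) = q.drop (q.length - k) ++ [c] := by
      have : (q ++ [c]).length - (k+1) = q.length - k := by simp
      rw [this, List.drop_append_of_le_length (by omega)]
    rw [e1, e2] at h2
    have hlen : (q.take k).length = (q.drop (q.length - k)).length := by
      rw [List.length_take, List.length_drop]; omega
    obtain ⟨ha, hb⟩ := List.append_inj h2 (by simpa using hlen)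
    refine ⟨⟨hk, ha⟩, ?_⟩
    rw [List.getD_eq_getElem?_getD, List.getElem?_eq_getElem hk]
    simpa using hb
  · rintro ⟨⟨hk, hq⟩, hc⟩
    refine ⟨by simp; omega, ?_⟩
    have e1 : (q ++ [c]).take (k+1) = q.take k ++ [q[k]] := by
      rw [List.take_append_of_le_length (by omega), List.take_add_one]
      simp [List.getElem?_eq_getElem hk]
    have e2 : (q ++ [c]).drop ((q ++ [c]).length - (k+1)) = q.drop (q.length - k) ++ [c] := by
      have : (q ++ [c]).length - (k+1) = q.length - k := by simp
      rw [this, List.drop_append_of_le_length (by omega)]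
    rw [e1, e2, hq]
    congr 1
    rw [List.getD_eq_getElem?_getD, List.getElem?_eq_getElem hk] at hc
    simpa using hc

theorem pv_getD_take (p : List (Option Char)) (i k : Nat) (h : k < i) :
    (p.take i).getD k none = p.getD k none := by
  rw [List.getD_eq_getElem?_getD, List.getD_eq_getElem?_getD, List.getElem?_take_of_lt h]

-- the fall loop: its result is a border, bounds every border extendable by c, and satisfies
-- the loop's exit condition
theorem pvFall_inv (p : List (Option Char)) (i : Nat) (c : Option Char) (pi : List Nat)
    (hpi : ∀ m, m < i → pi.getD m 0 = pvMaxB (p.take (m+1)))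
    (hip : i ≤ p.length) :
    ∀ fuel j, j ≤ fuel → pvBorder (p.take i) j →
      (∀ k, pvBorder (p.take i) k → p.getD k none = c → k ≤ j) →
      pvBorder (p.take i) (pvFall p pi c fuel j) ∧
      (∀ k, pvBorder (p.take i) k → p.getD k none = c → k ≤ pvFall p pi c fuel j) ∧
      (pvFall p pi c fuel j = 0 ∨ p.getD (pvFall p pi c fuel j) none = c) := by
  have hlen : (p.take i).length = i := by rw [List.length_take]; omega
  intro fuel
  induction fuel with
  | zero =>
    intro j hj hb hub
    have : j = 0 := by omega
    subst this
    exact ⟨hb, hub, Or.inl rfl⟩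
  | succ fuel ih =>
    intro j hj hb hub
    rw [pvFall]
    split
    · rename_i hcond
      obtain ⟨hj0, hne⟩ := hcond
      have hjlt : j < i := by have := hb.1; omega
      have hpij : pi.getD (j-1) 0 = pvMaxB (p.take j) := by
        have := hpi (j-1) (by omega)
        rwa [Nat.sub_add_cancel (by omega)] at this
      have htk : (p.take i).take j = p.take j := by
        rw [List.take_take]; congr 1; omega
      have hne' : p.take j ≠ [] := by
        have hlj : (p.take j).length = j := by rw [List.length_take]; omega
        intro hnil
        rw [hnil] at hlj
        simp at hlj
        omega
      have hlt : pvMaxB (p.take j) < j := by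
        have := pvMaxB_lt (p.take j) hne'
        rwa [List.length_take, Nat.min_eq_left (by omega)] at this
      have hbj' : pvBorder (p.take i) (pvMaxB (p.take j)) := by
        apply pvBorder_trans (p.take i) j _ hb
        rw [htk]
        exact pvMaxB_border (p.take j) hne'
      have hub' : ∀ k, pvBorder (p.take i) k → p.getD k none = c → k ≤ pvMaxB (p.take j) := by
        intro k hk hkc
        have hkj : k ≤ j := hub k hk hkc
        have hkne : k ≠ j := by
          intro hkj'
          subst hkj'
          exact hne hkc
        have hmono := pvBorder_mono (p.take i) k j hk hb (by omega)
        rw [htk] at hmono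
        have := pvMaxB_ge (p.take j) k hmono
        exact this
      rw [hpij]
      exact ih (pvMaxB (p.take j)) (by omega) hbj' hub'
    · rename_i hcond
      refine ⟨hb, hub, ?_⟩
      by_cases h0 : j = 0
      · exact Or.inl h0
      · right
        by_contra hne
        exact hcond ⟨by omega, hne⟩

-- one step of the prefix-function loop computes the next maximal border
theorem pvKmpStep_correct (p : List (Option Char)) (i : Nat) (h1 : 1 ≤ i) (h2 : i < p.length) :
    pvKmpStep p ((List.range i).map (fun m => pvMaxB (p.take (m+1))), pvMaxB (p.take i)) i
      = ((List.range (i+1)).map (fun m => pvMaxB (p.take (m+1))), pvMaxB (p.take (i+1))) := by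
  have hlen : (p.take i).length = i := by rw [List.length_take]; omega
  have hqne : p.take i ≠ [] := by
    intro hnil
    have := congrArg List.length hnil
    rw [hlen] at this
    simp at this
    omega
  have hpi : ∀ m, m < i → ((List.range i).map (fun m => pvMaxB (p.take (m+1)))).getD m 0
      = pvMaxB (p.take (m+1)) := by
    intro m hm
    rw [List.getD_eq_getElem?_getD, List.getElem?_map]
    simp [List.getElem?_range hm]
  have hsucc : p.take (i+1) = p.take i ++ [p.getD i none] := by
    rw [List.take_add_one, List.getElem?_eq_getElem h2]
    simp [List.getD_eq_getElem?_getD, List.getElem?_eq_getElem h2]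
  have hfall := pvFall_inv p i (p.getD i none)
    ((List.range i).map (fun m => pvMaxB (p.take (m+1)))) hpi (le_of_lt h2)
    (pvMaxB (p.take i)) (pvMaxB (p.take i)) le_rfl (pvMaxB_border (p.take i) hqne)
    (fun k hk _ => pvMaxB_ge (p.take i) k hk)
  obtain ⟨hbj1, hubj1, hexit⟩ := hfall
  set c := p.getD i none with hcdef
  set pi := (List.range i).map (fun m => pvMaxB (p.take (m+1))) with hpidef
  set j1 := pvFall p pi c (pvMaxB (p.take i)) (pvMaxB (p.take i)) with hj1def
  have hj1lt : j1 < i := by have := hbj1.1; omega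
  have hj2 : (if p.getD j1 none = c then j1 + 1 else j1) = pvMaxB (p.take (i+1)) := by
    rw [hsucc]
    by_cases hc : p.getD j1 none = c
    · rw [if_pos hc]
      apply Nat.le_antisymm
      · apply pvMaxB_ge
        apply (pvBorder_ext (p.take i) c j1).mpr
        refine ⟨hbj1, ?_⟩
        rw [pv_getD_take p i j1 hj1lt]
        exact hc
      · have hb' := pvMaxB_border (p.take i ++ [c]) (by simp)
        cases hM : pvMaxB (p.take i ++ [c]) with
        | zero => omega
        | succ m =>
          rw [hM] at hb'
          obtain ⟨hbm, hcm⟩ := (pvBorder_ext (p.take i) c m).mp hb'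
          have hmlt : m < i := by have := hbm.1; omega
          have := hubj1 m hbm (by rw [← pv_getD_take p i m hmlt]; exact hcm)
          omega
    · rw [if_neg hc]
      have hj10 : j1 = 0 := by
        rcases hexit with h0 | hcc
        · exact h0
        · exact absurd hcc hc
      rw [hj10]
      have hb' := pvMaxB_border (p.take i ++ [c]) (by simp)
      cases hM : pvMaxB (p.take i ++ [c]) with
      | zero => rfl
      | succ m =>
        rw [hM] at hb'
        obtain ⟨hbm, hcm⟩ := (pvBorder_ext (p.take i) c m).mp hb'
        have hmlt : m < i := by have := hbm.1; omega
        have hm0 := hubj1 m hbm (by rw [← pv_getD_take p i m hmlt]; exact hcm)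
        rw [hj10] at hm0
        have : m = 0 := by omega
        subst this
        exact absurd (by rw [hj10, ← pv_getD_take p i 0 (by omega)]; exact hcm) hc
  show (pi ++ [if p.getD j1 none = c then j1 + 1 else j1], if p.getD j1 none = c then j1 + 1 else j1)
      = ((List.range (i+1)).map (fun m => pvMaxB (p.take (m+1))), pvMaxB (p.take (i+1)))
  rw [hj2, hpidef, List.range_succ]
  simp

-- the whole prefix-function fold
theorem pvKmp_fold (p : List (Option Char)) (hp : 1 ≤ p.length) :
    ∀ m, m ≤ p.length - 1 →
    (List.range' 1 m).foldl (pvKmpStep p) ([0], 0)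
      = ((List.range (m+1)).map (fun k => pvMaxB (p.take (k+1))), pvMaxB (p.take (m+1))) := by
  have hone : pvMaxB (p.take 1) = 0 := by
    unfold pvMaxB
    rw [List.length_take, Nat.min_eq_left hp]
    rfl
  intro m
  induction m with
  | zero =>
    intro _
    simp [List.range', hone]
  | succ m ih =>
    intro hm
    have hconcat : List.range' 1 (m+1) = List.range' 1 m ++ [1 + m] := by
      simpa using (List.range'_concat :
        List.range' 1 (m+1) 1 = List.range' 1 m 1 ++ [1 + 1 * m])
    rw [hconcat, List.foldl_append, ih (by omega)]
    simp only [List.foldl_cons, List.foldl_nil]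
    have : 1 + m = m + 1 := by omega
    rw [this]
    exact pvKmpStep_correct p (m+1) (by omega) (by omega)

-- B's overlap is the maximal border of the combined word
theorem pvOverlapB_eq_maxB (s t : String) :
    pvOverlapB s t
      = ((pvMaxB (t.toList.map some ++ [none] ++ s.toList.map some) : Nat) : Int) := by
  set p : List (Option Char) := t.toList.map some ++ [none] ++ s.toList.map some with hpdef
  have hp : 1 ≤ p.length := by simp [hpdef]; omega
  show (((((List.range' 1 (p.length - 1)).foldl (pvKmpStep p) ([0], 0)).1.getLastD 0 : Nat) : Int)) = _
  rw [pvKmp_fold p hp (p.length - 1) le_rfl]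
  have hlast : ((List.range (p.length - 1 + 1)).map (fun k => pvMaxB (p.take (k+1)))).getLastD 0
      = pvMaxB (p.take (p.length - 1 + 1)) := by
    rw [List.getLastD_eq_getLast?, List.getLast?_eq_getElem?]
    simp
  rw [hlast]
  congr 2
  rw [Nat.sub_add_cancel hp, List.take_length]

-- which of the 'none' positions: the separator is the only none in the combined word
theorem pv_none_pos (s t : List Char) (idx : Nat) :
    (t.map some ++ [none] ++ s.map some)[idx]? = some none → idx = t.length := by
  intro h
  rcases Nat.lt_or_ge idx t.length with hlt | hge
  · rw [List.getElem?_append_left (by simp; omega),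
      List.getElem?_append_left (by simpa using hlt), List.getElem?_map] at h
    cases h' : t[idx]? with
    | none => rw [h'] at h; simp at h
    | some a => rw [h'] at h; simp at h
  · by_cases heq : idx = t.length
    · exact heq
    · have hgt : t.length + 1 ≤ idx := by omega
      rw [List.getElem?_append_right (by simp; omega)] at h
      simp only [List.length_append, List.length_map, List.length_cons, List.length_nil] at h
      have hd : idx - (t.length + 1) = idx - t.length - 1 := by omega
      rw [List.getElem?_map] at h
      cases h' : s[idx - (t.length + 1)]? with
      | none => rw [h'] at h; simp at h
      | some a => rw [h'] at h; simp at h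

-- borders of the combined word are exactly the suffix-prefix overlaps
theorem pvMaxB_combined (s t : String) :
    pvMaxB (t.toList.map some ++ [none] ++ s.toList.map some)
      = pvBestN (fun j => decide (t.toList.take j = s.toList.drop (s.toList.length - j)))
          (min s.toList.length t.toList.length) := by
  set T := t.toList.map some with hTdef
  set S := s.toList.map some with hSdef
  set P : List (Option Char) := T ++ [none] ++ S with hPdef
  have hTlen : T.length = t.toList.length := by simp [hTdef]
  have hSlen : S.length = s.toList.length := by simp [hSdef]
  have hPlen : P.length = T.length + 1 + S.length := by simp [hPdef]; omega
  have hchar : ∀ k, k ≤ T.length → k ≤ S.length →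
      ((P.take k = P.drop (P.length - k)) ↔
        (t.toList.take k = s.toList.drop (s.toList.length - k))) := by
    intro k hkT hkS
    have e1 : P.take k = (t.toList.take k).map some := by
      rw [hPdef, List.take_append_of_le_length (by simp; omega),
        List.take_append_of_le_length (by omega), hTdef, List.map_take]
    have e2 : P.drop (P.length - k) = (s.toList.drop (s.toList.length - k)).map some := by
      rw [hPdef]
      have : P.length - k = (T ++ [none]).length + (S.length - k) := by
        simp only [List.length_append, List.length_cons, List.length_nil] at hPlen ⊢
        omega
      rw [hPdef] at this
      rw [this, List.drop_append]
      rw [List.drop_eq_nil_of_le (by omega), Nat.add_sub_cancel_left, hSdef, List.map_drop, hSlen]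
      simp
    rw [e1, e2]
    constructor
    · intro h
      exact List.map_injective_iff.mpr (fun a b hab => Option.some.inj hab) h
    · intro h
      rw [h]
  apply pvBestN_eq
  intro k
  constructor
  · rintro ⟨hk, heq⟩
    rw [decide_eq_true_eq] at heq
    -- k ≤ T.length: otherwise position T.length of the prefix is the separator
    have hkT : k ≤ T.length := by
      by_contra hgt
      rw [Nat.not_le] at hgt
      have h1 : (P.take k)[T.length]? = some none := by
        rw [List.getElem?_take_of_lt hgt, hPdef,
          List.getElem?_append_left (by simp),
          List.getElem?_append_right (by omega)]
        simp
      rw [heq, List.getElem?_drop] at h1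
      have := pv_none_pos s.toList t.toList (P.length - k + T.length) h1
      omega
    -- k ≤ S.length: otherwise the suffix contains the separator at offset T.length-(P.length-k)
    have hkS : k ≤ S.length := by
      by_contra hgt
      rw [Nat.not_le] at hgt
      have hd1 : 1 ≤ P.length - k := by omega
      have hd2 : P.length - k ≤ T.length := by omega
      have h1 : (P.drop (P.length - k))[T.length - (P.length - k)]? = some none := by
        rw [List.getElem?_drop]
        have : P.length - k + (T.length - (P.length - k)) = T.length := by omega
        rw [this, hPdef, List.getElem?_append_left (by simp),
          List.getElem?_append_right (by omega)]
        simp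
      rw [← heq, List.getElem?_take_of_lt (by omega)] at h1
      have := pv_none_pos s.toList t.toList (T.length - (P.length - k)) h1
      omega
    refine ⟨by omega, ?_⟩
    rw [decide_eq_true_eq]
    exact (hchar k hkT hkS).mp heq
  · rintro ⟨hk, heq⟩
    rw [decide_eq_true_eq] at heq
    have hkT : k ≤ T.length := by omega
    have hkS : k ≤ S.length := by omega
    refine ⟨by omega, ?_⟩
    rw [decide_eq_true_eq]
    exact (hchar k hkT hkS).mpr heq

-- A's overlap equals B's KMP overlap
theorem pv_overlap_eq (s t : String) : pvCheckSequenceA s t = pvOverlapB s t := by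
  have hA : pvCheckSequenceA s t = pvOv s.toList t.toList := by
    have h := pvA_loop s t s.toList.length 0 (by omega)
    simpa [pvCheckSequenceA] using h
  rw [hA, pvOv_eq_pvBest, pvOverlapB_eq_maxB, pvMaxB_combined]
  rfl

theorem pv_step_eq (acc : List String) (seq : String) :
    (let p := acc.foldl
        (fun (so : Int × Int) saved =>
          (so.1 + pvCheckBothA saved seq, so.2 + pvCheckBothA (pvComplementA seq) saved)) (0, 0)
     if p.1 > p.2 then acc ++ [seq] else acc ++ [pvComplementA seq])
    = (let comp := pvRevCompB seq
       let score := acc.foldl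
        (fun sc w =>
          sc + (pvOverlapB w seq + pvOverlapB seq w) - (pvOverlapB comp w + pvOverlapB w comp)) 0
       acc ++ [if score > 0 then seq else comp]) := by
  show (if (acc.foldl _ ((0:Int), (0:Int))).1 > (acc.foldl _ ((0:Int), (0:Int))).2 then _ else _) = _
  rw [PySem.List.foldl_prod_mk (f := fun a saved => a + pvCheckBothA saved seq)
      (g := fun a saved => a + pvCheckBothA (pvComplementA seq) saved)]
  rw [PySem.List.foldl_add, PySem.List.foldl_add]
  show _ = acc ++ [if (acc.foldl _ (0:Int)) > 0 then seq else pvRevCompB seq]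
  rw [PySem.List.foldl_congr_mem acc _
      (fun sc w => sc + ((pvOverlapB w seq + pvOverlapB seq w)
        - (pvOverlapB (pvRevCompB seq) w + pvOverlapB w (pvRevCompB seq)))) 0
      (by intro a x hx; ring)]
  rw [PySem.List.foldl_add]
  have hsum : (acc.map (fun w => (pvOverlapB w seq + pvOverlapB seq w)
        - (pvOverlapB (pvRevCompB seq) w + pvOverlapB w (pvRevCompB seq)))).sum
      = (acc.map (fun w => pvCheckBothA w seq)).sum
        - (acc.map (fun w => pvCheckBothA (pvComplementA seq) w)).sum := by
    induction acc with
    | nil => simp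
    | cons a l ih =>
      simp only [List.map_cons, List.sum_cons, ih, pvCheckBothA, pv_overlap_eq, pv_compl_eq]
      ring
  have heta : (List.map (fun w => pvCheckBothA (pvRevCompB seq) w) acc)
      = List.map (pvCheckBothA (pvRevCompB seq)) acc := rfl
  rw [hsum, pv_compl_eq, heta]
  split_ifs <;> first | rfl | (exfalso; simp only [gt_iff_lt] at *; omega)

-- ===== VERDICT (by name: the statement is the Claim_ definition above) =====
theorem rebuild_sequences_considering_double_helix_py_spec : Claim_equal_rebuild_sequences_considering_double_helix_py := by
  intro l_sequences hDom hPre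
  unfold Spec_rebuild_sequences_considering_double_helix_py
  simp only [rebuild_sequences_considering_double_helix_py,
    rebuild_sequences_considering_double_helix_py_alt]
  rw [PySem.List.slice_from_one]
  exact PySem.List.foldl_congr_mem _ _ _ _ (fun acc x _ => pv_step_eq acc x)
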